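-- pv_equiv track=rewrite | github.com/RahulNenavath/Digital-Image-Processing | Assignment_1/1.py | Mode_matrix
-- ===== SOURCE A (Python) =====
-- def Mode_matrix(A):
--   k = 0
--   size = len(A)
--   temp = [0]*(size*size)
--
--   for i in range(0,5):
--     for j in range(0,5):
--       temp[k] = A[i][j]
--       k = k + 1
--
--   most = max(list(map(temp.count, temp)))
--   return list(set(filter(lambda x: temp.count(x) == most, temp)))
-- ===== SOURCE B (Python) =====
-- def Mode_matrix(A):
--   k = 0
--   size = len(A)
--   temp = [0]*(size*size)
--
--   for i in range(0,5):
--     for j in range(0,5):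
--       temp[k] = A[i][j]
--       k = k + 1
--
--   s = sorted(temp)
--   best = 0
--   run = 0
--   prev = 0
--   modes = set()
--   for v in s:
--     if run != 0 and v == prev:
--       run = run + 1
--     else:
--       run = 1
--       prev = v
--     if run > best:
--       best = run
--       modes = {v}
--     elif run == best:
--       modes.add(v)
--   return list(set(x for x in temp if x in modes))
-- ===== Notes on version B (the rewrite author's own statement) =====
-- stated objective: alternative
-- what changed: A recounts occurrences with temp.count inside max() and again inside the filter (repeated quadratic scans); B sorts the flattened list once and finds the maximal run length and the values of the maximal runs in a single run-length scan, then emits the modes in A's set order.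
import Mathlib
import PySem

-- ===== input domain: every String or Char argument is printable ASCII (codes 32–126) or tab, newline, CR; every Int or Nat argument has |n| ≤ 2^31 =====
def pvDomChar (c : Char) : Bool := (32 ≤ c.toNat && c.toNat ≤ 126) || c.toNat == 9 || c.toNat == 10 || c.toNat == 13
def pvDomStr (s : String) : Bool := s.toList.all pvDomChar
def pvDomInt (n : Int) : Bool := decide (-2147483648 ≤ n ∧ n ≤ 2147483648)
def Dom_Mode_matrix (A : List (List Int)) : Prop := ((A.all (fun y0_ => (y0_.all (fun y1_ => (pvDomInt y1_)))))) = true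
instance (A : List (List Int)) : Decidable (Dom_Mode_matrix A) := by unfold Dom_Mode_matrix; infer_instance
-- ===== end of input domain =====

-- B keeps A's flatten loops but replaces the repeated temp.count scans by sorting
-- the flattened list and collecting the values of the longest runs in one pass.

-- ===== PORT A =====
-- A's flatten loops (B copies them verbatim in source)
def pvFlatten (A : List (List Int)) : List Int :=
  ((PySem.List.pyRange 0 5 1).foldl (fun (st : List Int × Int) i =>
      (PySem.List.pyRange 0 5 1).foldl (fun st j =>
        (PySem.List.pySetD st.1 st.2 (PySem.List.pyGetD (PySem.List.pyGetD A i []) j 0), st.2 + 1)) st)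
    (List.replicate (A.length * A.length) 0, 0)).1

def Mode_matrix (A : List (List Int)) : List Int :=
  let temp := pvFlatten A
  let most := (PySem.List.max? (temp.map (fun x => (temp.count x : Int))) (fun y => y)).getD 0
  PySem.Set.ofList (temp.filter (fun x => (temp.count x : Int) == most))

-- ===== PORT B =====
-- one step of B's run-length scan over the sorted list: state (best, run, prev, modes)
def pvStep (st : Int × Int × Int × PySem.Set Int) (v : Int) : Int × Int × Int × PySem.Set Int :=
  let rp := if st.2.1 != 0 && v == st.2.2.1 then (st.2.1 + 1, st.2.2.1) else ((1 : Int), v)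
  if rp.1 > st.1 then (rp.1, rp.1, rp.2, PySem.Set.ofList [v])
  else if rp.1 == st.1 then (st.1, rp.1, rp.2, PySem.Set.add st.2.2.2 v)
  else (st.1, rp.1, rp.2, st.2.2.2)

def Mode_matrix_alt (A : List (List Int)) : List Int :=
  let temp := pvFlatten A
  let s := PySem.List.sorted temp (fun x => x) false
  let st := s.foldl pvStep (0, 0, 0, PySem.Set.empty)
  PySem.Set.ofList (temp.filter (fun x => PySem.Set.contains st.2.2.2 x))

-- ===== PRECONDITION & SPEC =====
-- exactly the inputs where the Python A returns: at least 5 rows, each of the first 5 rows with at least 5 entries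
def Pre_Mode_matrix (A : List (List Int)) : Prop :=
  5 ≤ A.length ∧ ∀ r ∈ A.take 5, 5 ≤ r.length
instance (A : List (List Int)) : Decidable (Pre_Mode_matrix A) := by unfold Pre_Mode_matrix; infer_instance

def pvWitness_Mode_matrix : List (List Int) :=
  [[1,2,3,4,5],[1,1,2,2,3],[0,0,0,1,2],[5,5,5,5,5],[1,2,3,4,5]]

def Spec_Mode_matrix (A : List (List Int)) (out : List Int) : Prop := out = Mode_matrix_alt A
instance (A : List (List Int)) (out : List Int) : Decidable (Spec_Mode_matrix A out) := by unfold Spec_Mode_matrix; infer_instance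

-- ===== CLAIM (what is proved, stated in full; the proofs are below) =====
def Claim_equal_Mode_matrix : Prop := ∀ (A : List (List Int)), Dom_Mode_matrix A → Pre_Mode_matrix A → Spec_Mode_matrix A (Mode_matrix A)

-- ===== LEMMAS AND PROOFS =====

-- invariant of B's scan after processing the nonempty sorted prefix p
def pvInv (p : List Int) (st : Int × Int × Int × PySem.Set Int) : Prop :=
  (∀ x ∈ p, (p.count x : Int) ≤ st.1) ∧ (∃ x ∈ p, (p.count x : Int) = st.1) ∧
  st.2.2.1 ∈ p ∧ (∀ x ∈ p, x ≤ st.2.2.1) ∧ st.2.1 = (p.count st.2.2.1 : Int) ∧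
  (∀ x, x ∈ st.2.2.2 ↔ x ∈ p ∧ (p.count x : Int) = st.1)
-- count over a one-element extension, as Int
theorem pv_count_app (p : List Int) (v x : Int) :
    ((p ++ [v]).count x : Int) = (p.count x : Int) + (if x = v then 1 else 0) := by
  by_cases h : x = v
  · simp [List.count_append, h]
  · simp [List.count_append, h, List.count_eq_zero_of_not_mem (show x ∉ [v] by simp [h])]

-- one scan step preserves the invariant when every earlier element is ≤ the new one
theorem pv_step_inv (p : List Int) (v : Int) (st : Int × Int × Int × PySem.Set Int)
    (_hp : p ≠ []) (hle : ∀ x ∈ p, x ≤ v) (h : pvInv p st) : pvInv (p ++ [v]) (pvStep st v) := by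
  obtain ⟨hmax, ⟨w, hw, hwc⟩, hprev, hprevmax, hrun, hmodes⟩ := h
  obtain ⟨best, run, prev, modes⟩ := st
  simp only at hmax hwc hprev hprevmax hrun hmodes ⊢
  have hrun1 : (1 : Int) ≤ run := by
    rw [hrun]; exact_mod_cast List.count_pos_iff.mpr hprev
  have hbest1 : (1 : Int) ≤ best := by
    have h1 := hmax w hw
    have h2 : (1 : Int) ≤ (p.count w : Int) := by exact_mod_cast List.count_pos_iff.mpr hw
    omega
  have hcnt := pv_count_app p v
  by_cases hv : v = prev
  · -- run of prev continues
    subst hv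
    have hpv : (p.count v : Int) = run := hrun.symm
    have hstep : pvStep (best, run, v, modes) v =
        if run + 1 > best then (run + 1, run + 1, v, PySem.Set.ofList [v])
        else if run + 1 == best then (best, run + 1, v, PySem.Set.add modes v)
        else (best, run + 1, v, modes) := by
      simp [pvStep, show run ≠ 0 by omega]
    rw [hstep]
    split_ifs with h1 h2 <;> unfold pvInv <;> dsimp only
    · refine ⟨?_, ⟨v, by simp, by rw [hcnt]; simp [hpv]⟩, by simp [hprev], ?_, ?_, ?_⟩
      · intro x hx
        rw [hcnt x]
        by_cases hxv : x = v
        · simp [hxv, hpv]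
        · have hxp : x ∈ p := by simpa [hxv] using hx
          have := hmax x hxp
          simp [hxv]; omega
      · intro x hx
        rcases List.mem_append.mp hx with hx | hx
        · exact hprevmax x hx
        · simp at hx; omega
      · rw [hcnt v]; simp [hpv]
      · intro x
        constructor
        · intro hx
          have hxv : x = v := by simpa [PySem.Set.ofList] using hx
          subst hxv
          exact ⟨by simp, by rw [hcnt]; simp [hpv]⟩
        · rintro ⟨hx1, hx2⟩
          by_cases hxv : x = v
          · simp [hxv, PySem.Set.ofList]
          · have hxp : x ∈ p := by simpa [hxv] using hx1
            rw [hcnt x] at hx2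
            have := hmax x hxp
            simp [hxv] at hx2
            omega
    · have h2' : run + 1 = best := by exact_mod_cast beq_iff_eq.mp h2
      have hvnm : v ∉ modes := by
        intro hvm
        have := (hmodes v).mp hvm
        omega
      refine ⟨?_, ⟨v, by simp, by rw [hcnt]; simp [hpv]; omega⟩, by simp [hprev], ?_, ?_, ?_⟩
      · intro x hx
        rw [hcnt x]
        by_cases hxv : x = v
        · simp [hxv, hpv]; omega
        · have hxp : x ∈ p := by simpa [hxv] using hx
          have := hmax x hxp
          simp [hxv]; omega
      · intro x hx
        rcases List.mem_append.mp hx with hx | hx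
        · exact hprevmax x hx
        · simp at hx; omega
      · rw [hcnt v]; simp [hpv]
      · intro x
        rw [PySem.Set.mem_add, hcnt x]
        constructor
        · rintro (hx | rfl)
          · obtain ⟨hx1, hx2⟩ := (hmodes x).mp hx
            have hxv : x ≠ v := by rintro rfl; exact hvnm hx
            exact ⟨by simp [hx1], by simp [hxv]; omega⟩
          · exact ⟨by simp, by simp [hpv]; omega⟩
        · rintro ⟨hx1, hx2⟩
          by_cases hxv : x = v
          · right; exact hxv
          · left
            have hxp : x ∈ p := by simpa [hxv] using hx1
            simp [hxv] at hx2
            exact (hmodes x).mpr ⟨hxp, hx2⟩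
    · have h2' : run + 1 ≠ best := by
        intro hh; exact h2 (by exact_mod_cast beq_iff_eq.mpr hh)
      refine ⟨?_, ⟨w, by simp [hw], ?_⟩, by simp [hprev], ?_, ?_, ?_⟩
      · intro x hx
        rw [hcnt x]
        by_cases hxv : x = v
        · simp [hxv, hpv]; omega
        · have hxp : x ∈ p := by simpa [hxv] using hx
          have := hmax x hxp
          simp [hxv]; omega
      · rw [hcnt w]
        have hwv : w ≠ v := by
          rintro rfl
          rw [hpv] at hwc; omega
        simp [hwv, hwc]
      · intro x hx
        rcases List.mem_append.mp hx with hx | hx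
        · exact hprevmax x hx
        · simp at hx; omega
      · rw [hcnt v]; simp [hpv]
      · intro x
        rw [hmodes x, hcnt x]
        by_cases hxv : x = v
        · subst hxv
          constructor
          · rintro ⟨_, hc⟩; rw [hpv] at hc; omega
          · rintro ⟨_, hc⟩; simp [hpv] at hc; omega
        · simp [hxv]
  · -- new value starts a run of length 1
    have hvp : v ∉ p := by
      intro hvin
      exact hv (le_antisymm (hprevmax v hvin) (hle prev hprev))
    have hpv0 : (p.count v : Int) = 0 := by
      simp [List.count_eq_zero_of_not_mem hvp]
    have hvnm : v ∉ modes := fun hm => hvp ((hmodes v).mp hm).1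
    have hstep : pvStep (best, run, prev, modes) v =
        if (1:Int) > best then (1, 1, v, PySem.Set.ofList [v])
        else if (1:Int) == best then (best, 1, v, PySem.Set.add modes v)
        else (best, 1, v, modes) := by
      simp [pvStep, hv]
    rw [hstep]
    rw [if_neg (show ¬ ((1:Int) > best) by omega)]
    split_ifs with h2 <;> unfold pvInv <;> dsimp only
    · have h2' : (1:Int) = best := by exact_mod_cast beq_iff_eq.mp h2
      refine ⟨?_, ⟨v, by simp, by rw [hcnt]; simp [hpv0]; omega⟩, by simp, ?_, ?_, ?_⟩
      · intro x hx
        rw [hcnt x]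
        by_cases hxv : x = v
        · simp [hxv, hpv0]; omega
        · have hxp : x ∈ p := by simpa [hxv] using hx
          have := hmax x hxp
          simp [hxv]; omega
      · intro x hx
        rcases List.mem_append.mp hx with hx | hx
        · exact hle x hx
        · simp at hx; omega
      · rw [hcnt v]; simp [hpv0]
      · intro x
        rw [PySem.Set.mem_add, hcnt x]
        constructor
        · rintro (hx | rfl)
          · obtain ⟨hx1, hx2⟩ := (hmodes x).mp hx
            have hxv : x ≠ v := by rintro rfl; exact hvp hx1
            exact ⟨by simp [hx1], by simp [hxv]; omega⟩
          · exact ⟨by simp, by simp [hpv0]; omega⟩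
        · rintro ⟨hx1, hx2⟩
          by_cases hxv : x = v
          · right; exact hxv
          · left
            have hxp : x ∈ p := by simpa [hxv] using hx1
            simp [hxv] at hx2
            exact (hmodes x).mpr ⟨hxp, hx2⟩
    · have h2' : (1:Int) ≠ best := by
        intro hh; exact h2 (by exact_mod_cast beq_iff_eq.mpr hh)
      refine ⟨?_, ⟨w, by simp [hw], ?_⟩, by simp, ?_, ?_, ?_⟩
      · intro x hx
        rw [hcnt x]
        by_cases hxv : x = v
        · simp [hxv, hpv0]; omega
        · have hxp : x ∈ p := by simpa [hxv] using hx
          have := hmax x hxp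
          simp [hxv]; omega
      · rw [hcnt w]
        have hwv : w ≠ v := by rintro rfl; exact hvp hw
        simp [hwv, hwc]
      · intro x hx
        rcases List.mem_append.mp hx with hx | hx
        · exact hle x hx
        · simp at hx; omega
      · rw [hcnt v]; simp [hpv0]
      · intro x
        rw [hmodes x, hcnt x]
        by_cases hxv : x = v
        · subst hxv
          constructor
          · rintro ⟨hx1, _⟩; exact absurd hx1 hvp
          · rintro ⟨_, hc⟩; simp [hpv0] at hc; omega
        · simp [hxv]
theorem pv_scan_inv (q : List Int) : ∀ (p : List Int) (st : Int × Int × Int × PySem.Set Int),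
    (p ++ q).Pairwise (· ≤ ·) → p ≠ [] → pvInv p st → pvInv (p ++ q) (q.foldl pvStep st) := by
  induction q with
  | nil => intro p st h hp hi; simpa using hi
  | cons v q ih =>
    intro p st h hp hi
    have hle : ∀ x ∈ p, x ≤ v := by
      intro x hx
      exact (List.pairwise_append.mp h).2.2 x hx v (by simp)
    have h' : ((p ++ [v]) ++ q).Pairwise (· ≤ ·) := by
      simpa [List.append_assoc] using h
    have hres := ih (p ++ [v]) (pvStep st v) h' (by simp) (pv_step_inv p v st hp hle hi)
    simpa [List.append_assoc] using hres

theorem pv_inv_total (s : List Int) (hs : s.Pairwise (· ≤ ·)) (hne : s ≠ []) :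
    pvInv s (s.foldl pvStep (0, 0, 0, PySem.Set.empty)) := by
  obtain ⟨a, t, rfl⟩ := List.exists_cons_of_ne_nil hne
  have h1 : pvStep (0, 0, 0, PySem.Set.empty) a = (1, 1, a, PySem.Set.ofList [a]) := by
    simp [pvStep]
  have hbase : pvInv [a] (1, 1, a, PySem.Set.ofList [a]) := by
    refine ⟨by simp, ⟨a, by simp, by simp⟩, by simp, by simp, by simp, ?_⟩
    intro x
    rw [PySem.Set.mem_ofList]
    constructor
    · intro hx; simp at hx; simp [hx]
    · rintro ⟨hx, _⟩; exact hx
  have := pv_scan_inv t [a] (pvStep (0, 0, 0, PySem.Set.empty) a)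
    (by simpa using hs) (by simp) (h1 ▸ hbase)
  simpa using this

theorem pv_len_flatten (A : List (List Int)) : (pvFlatten A).length = A.length * A.length := by
  have hr : PySem.List.pyRange 0 5 1 = [0, 1, 2, 3, 4] := by decide
  unfold pvFlatten
  rw [hr]
  simp [List.foldl, PySem.List.length_pySetD]
theorem pv_main (temp : List Int) (hne : temp ≠ []) :
    PySem.Set.ofList (temp.filter (fun x => (temp.count x : Int) == (PySem.List.max? (temp.map (fun x => (temp.count x : Int))) (fun y => y)).getD 0))
      = PySem.Set.ofList (temp.filter (fun x =>
          PySem.Set.contains ((PySem.List.sorted temp (fun x => x) false).foldl pvStep (0, 0, 0, PySem.Set.empty)).2.2.2 x)) := by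
  set s := PySem.List.sorted temp (fun x => x) false with hsdef
  have hperm : s.Perm temp := PySem.List.sorted_perm temp (fun x => x) false
  have hsp : s.Pairwise (· ≤ ·) := by
    have := PySem.List.sorted_pairwise temp (fun x => x)
    simpa using this
  have hsne : s ≠ [] := by
    rw [hsdef, Ne, PySem.List.sorted_eq_nil_iff]
    exact hne
  obtain ⟨hmax, ⟨w, hw, hwc⟩, _, _, _, hmodes⟩ := pv_inv_total s hsp hsne
  set st := s.foldl pvStep (0, 0, 0, PySem.Set.empty) with hstdef
  set best := st.1 with hbest
  have hcs : ∀ x, s.count x = temp.count x := fun x => hperm.count_eq x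
  -- A's most equals B's best
  have hmost : (PySem.List.max? (temp.map (fun x => (temp.count x : Int))) (fun y => y)).getD 0 = best := by
    rcases hm : PySem.List.max? (temp.map (fun x => (temp.count x : Int))) (fun y => y) with _ | m
    · have := (PySem.List.max?_eq_none_iff _ _).mp hm
      simp [hne] at this
    · have hmem := PySem.List.max?_mem hm
      obtain ⟨x0, hx0, rfl⟩ := List.mem_map.mp hmem
      have hle1 : (temp.count x0 : Int) ≤ best := by
        rw [← hcs x0]
        exact hmax x0 (hperm.mem_iff.mpr hx0)
      have hle2 : best ≤ (temp.count x0 : Int) := by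
        have hwt : w ∈ temp := hperm.mem_iff.mp hw
        have := PySem.List.max?_isMax hm ((temp.count w : Int))
          (List.mem_map.mpr ⟨w, hwt, rfl⟩)
        rw [← hwc, hcs w]
        simpa using this
      simp [le_antisymm hle1 hle2]
  rw [hmost]
  refine congrArg PySem.Set.ofList (List.filter_congr ?_)
  intro x hx
  by_cases hc : (temp.count x : Int) = best
  · have hxm : x ∈ st.2.2.2 :=
      (hmodes x).mpr ⟨hperm.mem_iff.mpr hx, by rw [hcs]; exact hc⟩
    simp [hc, hxm]
  · have hxm : x ∉ st.2.2.2 := fun hm' => hc (by rw [← hcs x]; exact ((hmodes x).mp hm').2)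
    simp [hc, hxm]

theorem pv_flatten_ne_nil (A : List (List Int)) (h5 : 5 ≤ A.length) : pvFlatten A ≠ [] := by
  intro h
  have hl := pv_len_flatten A
  rw [h] at hl
  simp only [List.length_nil] at hl
  have h0 : A.length = 0 := mul_self_eq_zero.mp hl.symm
  omega

theorem Mode_matrix_spec : Claim_equal_Mode_matrix := by
  intro A _ hpre
  exact pv_main (pvFlatten A) (pv_flatten_ne_nil A hpre.1)
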